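-- pv_equiv track=rewrite | github.com/petermrrsh/climate-data | parse.py | removeCommas
-- ===== SOURCE A (Python) =====
-- def removeCommas(data):
--     insideQuotes = False  # false if not inside quotes, true otherwise
--     output = ''
--     for char in data:
--         if char == '\"':
--             insideQuotes = True
--         if not insideQuotes:
--             output += char
--         if char != ',' and insideQuotes == True:
--             output += char
--     return output
-- ===== SOURCE B (Python) =====
-- def removeCommas(data):
--     idx = data.find('"')
--     if idx == -1:
--         return data
--     return data[:idx+1] + data[idx+1:].replace(',', '')
-- ===== Notes on version B (the rewrite author's own statement) =====
-- stated objective: simpler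
-- what changed: Replaces the char-by-char accumulator loop with a find/slice/replace composition: everything up to and including the first double-quote is kept verbatim, and all commas are stripped from the remainder (mirroring A's never-resetting insideQuotes flag).
import Mathlib
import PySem

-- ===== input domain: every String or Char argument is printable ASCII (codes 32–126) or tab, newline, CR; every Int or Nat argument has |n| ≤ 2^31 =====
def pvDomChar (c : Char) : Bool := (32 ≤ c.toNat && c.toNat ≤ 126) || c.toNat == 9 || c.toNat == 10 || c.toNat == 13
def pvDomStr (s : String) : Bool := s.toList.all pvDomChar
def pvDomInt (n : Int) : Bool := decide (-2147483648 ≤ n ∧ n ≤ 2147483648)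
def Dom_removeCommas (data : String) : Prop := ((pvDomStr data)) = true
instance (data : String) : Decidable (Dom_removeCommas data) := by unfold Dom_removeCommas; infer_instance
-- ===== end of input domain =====

-- B keeps everything up to and including the first '"' verbatim and strips all commas
-- from the remainder via find/slice/replace, instead of A's char-by-char accumulator loop
-- (objective: simpler; exact equivalence, including A's never-resetting insideQuotes flag).

-- ===== PORT A =====
-- one loop step of A: the three ifs in Python's order, state = (insideQuotes, output)
def rcStep (st : Bool × List Char) (c : Char) : Bool × List Char :=
  let inside := if c == '"' then true else st.1
  let out := if !inside then st.2 ++ [c] else st.2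
  let out2 := if c != ',' && inside then out ++ [c] else out
  (inside, out2)

def removeCommas (data : String) : String :=
  String.ofList (data.toList.foldl rcStep (false, [])).2

-- ===== PORT B =====
def removeCommas_alt (data : String) : String :=
  let idx := PySem.Str.find data "\""
  if idx = -1 then data
  else PySem.Str.slice data none (some (idx + 1)) ++
       PySem.Str.replace (PySem.Str.slice data (some (idx + 1)) none) "," ""

-- ===== PRECONDITION & SPEC =====
def Spec_removeCommas (data : String) (out : String) : Prop := out = removeCommas_alt data
instance (data : String) (out : String) : Decidable (Spec_removeCommas data out) := by unfold Spec_removeCommas; infer_instance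

-- ===== CLAIM (what is proved, stated in full; the proofs are below) =====
def Claim_equal_removeCommas : Prop := ∀ (data : String), Dom_removeCommas data → Spec_removeCommas data (removeCommas data)

-- ===== LEMMAS AND PROOFS =====

theorem rc_foldl_true (cs : List Char) : ∀ out : List Char,
    cs.foldl rcStep (true, out) = (true, out ++ cs.filter (fun c => c != ',')) := by
  induction cs with
  | nil => intro out; simp
  | cons c t ih =>
    intro out
    by_cases hc : c = ','
    · subst hc; simp [List.foldl_cons, rcStep, ih]
    · simp [List.foldl_cons, rcStep, hc, ih]

theorem rc_foldl_false (cs : List Char) : ∀ out : List Char,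
    (cs.foldl rcStep (false, out)).2 =
      out ++ cs.takeWhile (fun c => !(c == '"')) ++
        (cs.dropWhile (fun c => !(c == '"'))).filter (fun c => c != ',') := by
  induction cs with
  | nil => intro out; simp
  | cons c t ih =>
    intro out
    by_cases hc : c = '"'
    · subst hc
      simp [List.foldl_cons, rcStep, rc_foldl_true]
    · simp [List.foldl_cons, rcStep, hc, ih]

theorem singleton_infix_iff_mem (a : Char) (l : List Char) : [a] <:+: l ↔ a ∈ l := by
  constructor
  · intro h; exact h.mem (by simp)
  · intro h; obtain ⟨s, t, rfl⟩ := List.mem_iff_append.mp h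
    exact ⟨s, t, by simp⟩

theorem singleton_prefix_iff_head? (a : Char) (l : List Char) : [a] <+: l ↔ l.head? = some a := by
  cases l <;> simp [List.cons_prefix_cons, eq_comm]

theorem replace_go_comma : ∀ (fuel : ℕ) (l acc : List Char), l.length ≤ fuel →
    PySem.Chars.replace.go [','] [] fuel l acc = acc.reverse ++ l.filter (fun c => c != ',') := by
  intro fuel
  induction fuel with
  | zero => intro l acc h; interval_cases hl : l.length; simp_all [PySem.Chars.replace.go,
      List.length_eq_zero_iff.mp hl]
  | succ n ih =>
    intro l acc h
    cases l with
    | nil => simp [PySem.Chars.replace.go]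
    | cons c t =>
      by_cases hc : c = ','
      · subst hc
        rw [PySem.Chars.replace.go]
        have : [','].isPrefixOf (',' :: t) = true := by simp [List.isPrefixOf]
        rw [this, if_pos rfl]
        rw [show (',' :: t).drop [','].length = t from rfl]
        rw [ih t _ (by simpa using Nat.le_of_succ_le_succ h)]
        simp
      · rw [PySem.Chars.replace.go]
        have : [','].isPrefixOf (c :: t) = false := by
          simp [List.isPrefixOf]; exact fun h => hc h.symm
        rw [this]
        simp only [Bool.false_eq_true, if_false]
        rw [ih t _ (by simpa using Nat.le_of_succ_le_succ h)]
        simp [hc]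

theorem drop_length_takeWhile (l : List Char) (p : Char → Bool) :
    l.drop (l.takeWhile p).length = l.dropWhile p := by
  induction l with
  | nil => simp
  | cons c t ih => by_cases hc : p c <;> simp [hc, ih]

theorem replace_comma (l : List Char) :
    PySem.Chars.replace l [','] [] = l.filter (fun c => c != ',') := by
  rw [PySem.Chars.replace]
  simp only [List.isEmpty_cons, Bool.false_eq_true, if_false]
  exact replace_go_comma l.length l [] le_rfl

theorem find_quote_of_mem (cs : List Char) (h : '"' ∈ cs) :
    PySem.Chars.find cs ['"'] = ((cs.takeWhile (fun c => !(c == '"'))).length : Int) := by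
  have hin : ['"'] <:+: cs := (singleton_infix_iff_mem _ _).mpr h
  have hnn : 0 ≤ PySem.Chars.find cs ['"'] := (PySem.Chars.find_nonneg_iff _ _).mpr hin
  obtain ⟨hpre, hmin⟩ := PySem.Chars.find_spec (s := cs) (sub := ['"']) hnn
  set n := (cs.takeWhile (fun c => !(c == '"'))).length with hn
  -- the dropWhile part is nonempty with head '"'
  have hsplit : cs.takeWhile (fun c => !(c == '"')) ++ cs.dropWhile (fun c => !(c == '"')) = cs :=
    List.takeWhile_append_dropWhile
  have hdropn : cs.drop n = cs.dropWhile (fun c => !(c == '"')) := by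
    rw [hn]; exact drop_length_takeWhile cs _
  have hdw_ne : cs.dropWhile (fun c => !(c == '"')) ≠ [] := by
    intro hnil
    have hmem : '"' ∈ cs.takeWhile (fun c => !(c == '"')) := by
      rw [← hsplit, hnil, List.append_nil] at h; exact h
    have hall := List.mem_takeWhile_imp hmem
    simp at hall
  have hpren : ['"'] <+: cs.drop n := by
    rw [hdropn, singleton_prefix_iff_head?]
    cases hdw : cs.dropWhile (fun c => !(c == '"')) with
    | nil => exact absurd hdw hdw_ne
    | cons d t =>
      have := List.head_dropWhile_not (p := fun c => !(c == '"')) (l := cs) (by simp [hdw])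
      simp only [hdw, List.head_cons] at this
      simp at this
      simp [this]
  have hnotbefore : ∀ i < n, ¬ ['"'] <+: cs.drop i := by
    intro i hi hp
    rw [singleton_prefix_iff_head?] at hp
    have hlt : i < cs.length := by
      have := (List.takeWhile_sublist (l := cs) (fun c => !(c == '"'))).length_le
      omega
    have hhead : (cs.drop i).head? = some cs[i] := by
      rw [List.drop_eq_getElem_cons hlt]; rfl
    replace hp : cs[i] = '"' := by
      have := hhead.symm.trans hp; simpa using this
    -- cs[i] is inside the takeWhile part, so it satisfies the predicate
    have hpref : cs.takeWhile (fun c => !(c == '"')) <+: cs := List.takeWhile_prefix _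
    have hgeq : (cs.takeWhile (fun c => !(c == '"')))[i]'(by omega) = cs[i] :=
      hpref.getElem (by omega)
    have hmem : cs[i] ∈ cs.takeWhile (fun c => !(c == '"')) := by
      rw [← hgeq]; exact List.getElem_mem _
    have := List.mem_takeWhile_imp hmem
    simp [hp] at this
  -- conclude find = n
  have h1 : ¬ ((PySem.Chars.find cs ['"']).toNat < n) := fun hlt =>
    hnotbefore _ hlt hpre
  have h2 : ¬ (n < (PySem.Chars.find cs ['"']).toNat) := fun hlt =>
    hmin n hlt hpren
  omega

-- ===== VERDICT (by name: the statement is the Claim_ definition above) =====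
theorem removeCommas_spec : Claim_equal_removeCommas := by
  intro data _
  unfold Spec_removeCommas
  set cs := data.toList with hcs
  suffices hT : (removeCommas data).toList = (removeCommas_alt data).toList by
    have := congrArg String.ofList hT; simpa using this
  by_cases h : '"' ∈ cs
  · -- a quote exists: B takes the prefix through the quote, strips commas after
    have hfind := find_quote_of_mem cs h
    set n := (cs.takeWhile (fun c => !(c == '"'))).length with hn
    have hne : PySem.Str.find data "\"" ≠ -1 := by
      rw [PySem.Str.find_eq]
      show PySem.Chars.find cs _ ≠ -1
      rw [show ("\"".toList) = ['"'] from rfl, hfind]; omega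
    have hfind' : PySem.Str.find data "\"" = (n : Int) := by
      rw [PySem.Str.find_eq]; exact hfind
    rw [removeCommas_alt]
    simp only [hne, if_false]
    rw [hfind']
    have hsplit : cs.takeWhile (fun c => !(c == '"')) ++ cs.dropWhile (fun c => !(c == '"')) = cs :=
      List.takeWhile_append_dropWhile
    obtain ⟨d, t, hdw⟩ : ∃ d t, cs.dropWhile (fun c => !(c == '"')) = d :: t := by
      cases hdw : cs.dropWhile (fun c => !(c == '"')) with
      | nil =>
        exfalso
        have hmem : '"' ∈ cs.takeWhile (fun c => !(c == '"')) := by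
          rw [← hsplit, hdw, List.append_nil] at h; exact h
        have hall := List.mem_takeWhile_imp hmem
        simp at hall
      | cons d t => exact ⟨d, t, rfl⟩
    have hd : d = '"' := by
      have := List.head_dropWhile_not (p := fun c => !(c == '"')) (l := cs) (by simp [hdw])
      simp only [hdw, List.head_cons] at this
      simpa using this
    subst hd
    -- compute both toLists
    have hslice1 : PySem.Chars.slice cs none (some ((n : Int) + 1)) =
        cs.takeWhile (fun c => !(c == '"')) ++ ['"'] := by
      have : ((n : Int) + 1) = ((n + 1 : ℕ) : Int) := by push_cast; ring
      rw [this, PySem.Chars.slice, PySem.List.slice_to_natCast]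
      conv_lhs => rw [← hsplit]
      rw [List.take_append]
      simp [hn, hdw]
    have hslice2 : PySem.Chars.slice cs (some ((n : Int) + 1)) none = t := by
      have : ((n : Int) + 1) = ((n + 1 : ℕ) : Int) := by push_cast; ring
      rw [this, PySem.Chars.slice, PySem.List.slice_from_natCast]
      conv_lhs => rw [← hsplit]
      rw [List.drop_append]
      simp [hn, hdw]
    rw [removeCommas]
    simp only [String.toList_append, String.toList_ofList, PySem.Str.toList_slice,
      PySem.Str.toList_replace, ← hcs]
    rw [show ("," : String).toList = [','] from rfl, show ("" : String).toList = [] from rfl]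
    rw [hslice1, hslice2, replace_comma, rc_foldl_false]
    rw [hdw]
    simp
  · -- no quote: A copies every char, B returns data unchanged
    have hone : PySem.Str.find data "\"" = -1 := by
      rw [PySem.Str.find_eq, PySem.Chars.find_eq_neg_one_iff]
      rw [show ("\"".toList) = ['"'] from rfl, singleton_infix_iff_mem]
      exact h
    rw [removeCommas_alt]
    simp only [hone, if_pos]
    rw [removeCommas, rc_foldl_false]
    have htw : cs.takeWhile (fun c => !(c == '"')) = cs :=
      List.takeWhile_eq_self_iff.mpr (fun a ha => by
        simp; rintro rfl; exact h ha)
    have hdw : cs.dropWhile (fun c => !(c == '"')) = [] :=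
      List.dropWhile_eq_nil_iff.mpr (fun a ha => by
        simp; rintro rfl; exact h ha)
    simp [htw, hdw, ← hcs]
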